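-- pv_equiv track=rewrite | github.com/sambergin/OldWork | mod.py | has_mul_inv
-- ===== SOURCE A (Python) =====
-- def has_mul_inv(a,m):
--     if type(a) != int:
--         res = 'Error(has_mul_inv)" Invalid input num'
--     elif type(m) != int or m < 1:
--         res = 'Error(has_mul_inv): Invalid mod'
--     else:
--         res = False
--         for i in range(m):
--             if ((i * a) % m == 1):
--                 res = True
--
--
--     return res
-- ===== SOURCE B (Python) =====
-- def has_mul_inv(a, m):
--     if type(a) != int:
--         res = 'Error(has_mul_inv)" Invalid input num'
--     elif type(m) != int or m < 1:
--         res = 'Error(has_mul_inv): Invalid mod'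
--     else:
--         # Euclidean algorithm: an inverse exists iff gcd(a, m) == 1
--         x, y = a, m
--         while y:
--             x, y = y, x % y
--         res = (x == 1)
--     return res
-- ===== Notes on version B (the rewrite author's own statement) =====
-- stated objective: faster
-- what changed: Replaces the O(m) scan over all residues i in range(m) testing (i*a) % m == 1 with an O(log m) Euclidean gcd while-loop; an inverse exists iff gcd(a, m) == 1.
-- intended difference: For m == 1 A returns False (its loop tests (i*a) % 1 == 1, which never holds since everything is 0 mod 1), while B returns True; every integer is invertible modulo 1 (0*a ≡ 1 ≡ 0 mod 1), so True is the intended value. — e.g. on has_mul_inv(2, 1): A returns false, B returns true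
-- outside the precondition, e.g. on has_mul_inv(3, 0): A returns 'Error(has_mul_inv): Invalid mod', B returns 'Error(has_mul_inv): Invalid mod'
import Mathlib
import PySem

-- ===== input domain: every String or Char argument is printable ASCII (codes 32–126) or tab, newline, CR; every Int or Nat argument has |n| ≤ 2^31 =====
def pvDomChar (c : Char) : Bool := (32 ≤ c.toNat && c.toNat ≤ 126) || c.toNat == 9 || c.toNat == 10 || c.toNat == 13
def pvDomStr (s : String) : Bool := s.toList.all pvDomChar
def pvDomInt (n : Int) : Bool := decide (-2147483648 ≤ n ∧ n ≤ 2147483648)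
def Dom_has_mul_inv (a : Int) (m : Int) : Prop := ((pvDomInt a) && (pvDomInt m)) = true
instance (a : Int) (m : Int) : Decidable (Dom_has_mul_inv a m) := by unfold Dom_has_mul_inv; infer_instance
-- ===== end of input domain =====

-- B replaces A's O(m) scan of all residues with the Euclidean gcd loop (inverse exists iff gcd(a,m)=1).

-- ===== PORT A =====
-- A's 'type(a) != int' / 'type(m) != int' guards are vacuous here (a m : Int); for m < 1
-- Python A returns an error STRING, not a bool — those inputs are excluded by Pre_ below.
def has_mul_inv (a : Int) (m : Int) : Bool :=
  if m < 1 then false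
  else (PySem.List.pyRange 0 m 1).foldl
    (fun res i => if PySem.Int.mod (i * a) m = 1 then true else res) false

-- ===== PORT B =====
-- the hand-rolled 'while y: x, y = y, x % y' loop of Source B
def euclidLoop (x : Int) (y : Int) : Int :=
  if h : y = 0 then x
  else euclidLoop y (PySem.Int.mod x y)
termination_by y.natAbs
decreasing_by
  rcases lt_trichotomy y 0 with hy | hy | hy
  · have h1 := (PySem.Int.mod_neg_bounds x hy).1
    have h2 := (PySem.Int.mod_neg_bounds x hy).2
    omega
  · exact absurd hy h
  · have h1 := PySem.Int.mod_nonneg x hy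
    have h2 := PySem.Int.mod_lt x hy
    omega

def has_mul_inv_alt (a : Int) (m : Int) : Bool :=
  if m < 1 then false
  else euclidLoop a m == 1

-- ===== PRECONDITION & SPEC =====
-- Pre_ excludes m < 1, where Python A returns an error string instead of a bool.
def Pre_has_mul_inv (a : Int) (m : Int) : Prop := 1 ≤ m
instance (a : Int) (m : Int) : Decidable (Pre_has_mul_inv a m) := by unfold Pre_has_mul_inv; infer_instance
def pvWitness_has_mul_inv : Int × Int := (3, 7)

-- For m = 1 A returns False (its loop tests (i*a) % 1 == 1, which never holds), while B
-- returns True; every integer is invertible modulo 1, so True is the intended value.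
def D_has_mul_inv (a : Int) (m : Int) : Prop := m = 1
instance (a : Int) (m : Int) : Decidable (D_has_mul_inv a m) := by unfold D_has_mul_inv; infer_instance

def Spec_has_mul_inv (a : Int) (m : Int) (out : Bool) : Prop := ¬ D_has_mul_inv a m → out = has_mul_inv_alt a m
instance (a : Int) (m : Int) (out : Bool) : Decidable (Spec_has_mul_inv a m out) := by unfold Spec_has_mul_inv; infer_instance

def pvDiffWitness_has_mul_inv : Int × Int := (2, 1)
def pvDiffWitnessOut_has_mul_inv : Bool × Bool := (false, true)

-- ===== CLAIM (what is proved, stated in full; the proofs are below) =====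
def Claim_unchanged_has_mul_inv : Prop := ∀ (a : Int) (m : Int), Dom_has_mul_inv a m → Pre_has_mul_inv a m → Spec_has_mul_inv a m (has_mul_inv a m)
def Claim_changed_has_mul_inv : Prop := Dom_has_mul_inv (pvDiffWitness_has_mul_inv.1) (pvDiffWitness_has_mul_inv.2) ∧ Pre_has_mul_inv (pvDiffWitness_has_mul_inv.1) (pvDiffWitness_has_mul_inv.2) ∧ D_has_mul_inv (pvDiffWitness_has_mul_inv.1) (pvDiffWitness_has_mul_inv.2) ∧ has_mul_inv (pvDiffWitness_has_mul_inv.1) (pvDiffWitness_has_mul_inv.2) = pvDiffWitnessOut_has_mul_inv.1 ∧ has_mul_inv_alt (pvDiffWitness_has_mul_inv.1) (pvDiffWitness_has_mul_inv.2) = pvDiffWitnessOut_has_mul_inv.2 ∧ pvDiffWitnessOut_has_mul_inv.1 ≠ pvDiffWitnessOut_has_mul_inv.2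
def Claim_exact_has_mul_inv : Prop := ∀ (a : Int) (m : Int), Dom_has_mul_inv a m → Pre_has_mul_inv a m → D_has_mul_inv a m → has_mul_inv a m ≠ has_mul_inv_alt a m

-- ===== LEMMAS AND PROOFS =====

-- A's accumulator loop is List.any
theorem foldl_if_true_eq_any (a m : Int) (l : List Int) (b : Bool) :
    l.foldl (fun res i => if PySem.Int.mod (i * a) m = 1 then true else res) b
      = (b || l.any (fun i => decide (PySem.Int.mod (i * a) m = 1))) := by
  induction l generalizing b with
  | nil => simp
  | cons x xs ih =>
      rw [List.foldl_cons, List.any_cons, ih]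
      by_cases hp : PySem.Int.mod (x * a) m = 1 <;> simp [hp]

-- the Euclidean loop computes Int.gcd (for positive second argument)
theorem euclidLoop_eq_gcd (x y : Int) (hy : 0 < y) : euclidLoop x y = (Int.gcd x y : Int) := by
  rw [euclidLoop, dif_neg (by omega : ¬ y = 0)]
  have hmod : PySem.Int.mod x y = x % y := PySem.Int.mod_eq_emod_of_pos hy
  by_cases hz : PySem.Int.mod x y = 0
  · rw [euclidLoop, dif_pos hz]
    have hx0 : x % y = 0 := by rw [← hmod, hz]
    rw [← Int.gcd_emod x y, hx0]
    simp [Int.natAbs_of_nonneg (le_of_lt hy)]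
  · have hpos : 0 < PySem.Int.mod x y := by
      have := PySem.Int.mod_nonneg x hy; omega
    rw [euclidLoop_eq_gcd y (PySem.Int.mod x y) hpos, hmod, Int.gcd_comm y (x % y),
      Int.gcd_emod]
termination_by y.natAbs
decreasing_by
  have := PySem.Int.mod_lt x hy
  have := PySem.Int.mod_nonneg x hy
  omega

-- existence of an inverse among the residues 0 ≤ i < m ↔ gcd(a,m) = 1   (for 2 ≤ m)
theorem exists_inv_iff_gcd_one (a m : Int) (hm : 2 ≤ m) :
    (∃ i, 0 ≤ i ∧ i < m ∧ (i * a) % m = 1) ↔ Int.gcd a m = 1 := by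
  have h1m : (1 : Int) % m = 1 := Int.emod_eq_of_lt (by omega) (by omega)
  constructor
  · rintro ⟨i, _, _, hmod⟩
    have h1 : m ∣ (i * a - 1) := by
      refine Int.dvd_of_emod_eq_zero ?_
      rw [Int.sub_emod, hmod, h1m]
      simp
    have hdvd : (Int.gcd a m : Int) ∣ 1 := by
      have hia : (Int.gcd a m : Int) ∣ i * a := Dvd.dvd.mul_left (Int.gcd_dvd_left a m) i
      have him : (Int.gcd a m : Int) ∣ i * a - 1 := dvd_trans (Int.gcd_dvd_right a m) h1
      have := dvd_sub hia him
      simpa using this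
    have : Int.gcd a m ∣ 1 := by exact_mod_cast hdvd
    exact Nat.dvd_one.mp this
  · intro hg
    refine ⟨(Int.gcdA a m) % m, Int.emod_nonneg _ (by omega), Int.emod_lt_of_pos _ (by omega), ?_⟩
    have hbez : (1 : Int) = a * Int.gcdA a m + m * Int.gcdB a m := by
      have := Int.gcd_eq_gcd_ab a m
      rw [hg] at this; exact_mod_cast this
    have hcong : ((Int.gcdA a m % m) * a) % m = (Int.gcdA a m * a) % m := by
      rw [Int.mul_emod, Int.emod_emod_of_dvd _ dvd_rfl, ← Int.mul_emod]
    have heq : Int.gcdA a m * a = 1 - m * Int.gcdB a m := by linarith [hbez]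
    rw [hcong, heq, Int.sub_emod, Int.mul_emod_right, h1m]
    simpa using h1m

theorem has_mul_inv_spec : Claim_unchanged_has_mul_inv := by
  intro a m _ hpre hD
  have hm1 : (1 : Int) ≤ m := hpre
  have hm : 2 ≤ m := by
    have : m ≠ 1 := hD
    omega
  have hnlt : ¬ m < 1 := by omega
  unfold has_mul_inv has_mul_inv_alt
  rw [if_neg hnlt, if_neg hnlt, foldl_if_true_eq_any, euclidLoop_eq_gcd a m (by omega),
    Bool.false_or, Bool.eq_iff_iff]
  simp only [List.any_eq_true, PySem.List.mem_pyRange_one, decide_eq_true_eq, beq_iff_eq]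
  have hmain := exists_inv_iff_gcd_one a m hm
  constructor
  · rintro ⟨i, ⟨h0, h1⟩, hmod⟩
    have hmod' : (i * a) % m = 1 := by
      rw [← PySem.Int.mod_eq_emod_of_pos (by omega : (0:Int) < m)]; exact hmod
    exact_mod_cast hmain.mp ⟨i, h0, h1, hmod'⟩
  · intro hg
    have hg' : Int.gcd a m = 1 := by exact_mod_cast hg
    obtain ⟨i, h0, h1, hmod⟩ := hmain.mpr hg'
    refine ⟨i, ⟨h0, h1⟩, ?_⟩
    rw [PySem.Int.mod_eq_emod_of_pos (by omega : (0:Int) < m)]; exact hmod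

theorem has_mul_inv_changed : Claim_changed_has_mul_inv := by
  unfold Claim_changed_has_mul_inv
  refine ⟨by decide, by decide, by decide, by decide, ?_, by decide⟩
  show has_mul_inv_alt 2 1 = true
  unfold has_mul_inv_alt
  rw [if_neg (by decide), euclidLoop_eq_gcd 2 1 (by decide)]
  decide

theorem has_mul_inv_tight : Claim_exact_has_mul_inv := by
  intro a m _ _ hD
  have hm : m = 1 := hD
  subst hm
  have hA : has_mul_inv a 1 = false := by
    unfold has_mul_inv
    rw [if_neg (by omega : ¬ (1:Int) < 1),
      PySem.List.pyRange_one_cons (by omega : (0:Int) < 1),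
      PySem.List.pyRange_one_eq_nil (by omega : (1:Int) ≤ 0 + 1)]
    simp only [List.foldl_cons, List.foldl_nil, zero_mul]
    rw [if_neg (by decide : ¬ PySem.Int.mod 0 1 = 1)]
  have hB : has_mul_inv_alt a 1 = true := by
    unfold has_mul_inv_alt
    rw [if_neg (by omega : ¬ (1:Int) < 1), euclidLoop_eq_gcd a 1 (by omega)]
    simp
  rw [hA, hB]
  simp
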